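-- pv_equiv track=rewrite | github.com/octospark/Pirple---Python-is-Easy | Project #2 Hangman/hangman.py | maskedWord
-- ===== SOURCE A (Python) =====
-- def maskedWord(word):
--     masked = ''
--     for letter in word:
--         if letter == ' ':
--             masked += ' '
--         else:
--             masked += '-'
--     return masked
-- ===== SOURCE B (Python) =====
-- def maskedWord(word):
--     return ' '.join('-' * len(token) for token in word.split(' '))
-- ===== Notes on version B (the rewrite author's own statement) =====
-- stated objective: faster
-- what changed: Replaces the per-character loop with a branch and repeated string concatenation by splitting on spaces, mapping each token to a dash run of its length, and rejoining with spaces.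
import Mathlib
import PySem

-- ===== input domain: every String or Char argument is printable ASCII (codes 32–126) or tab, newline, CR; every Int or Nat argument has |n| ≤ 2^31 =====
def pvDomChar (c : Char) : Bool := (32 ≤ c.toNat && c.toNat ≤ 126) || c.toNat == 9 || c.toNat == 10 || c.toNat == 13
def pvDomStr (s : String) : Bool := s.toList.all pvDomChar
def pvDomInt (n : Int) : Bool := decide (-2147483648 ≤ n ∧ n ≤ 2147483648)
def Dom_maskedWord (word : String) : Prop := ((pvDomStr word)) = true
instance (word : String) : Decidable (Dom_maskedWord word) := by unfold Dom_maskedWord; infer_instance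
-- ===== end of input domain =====

-- B replaces A's per-character loop-with-branch by split-on-space / map-to-dash-run / rejoin (idiomatic decomposition).


-- ===== PORT A =====
-- masked = ''; for letter in word: masked += ' ' if letter == ' ' else '-'; return masked
def maskedWord (word : String) : String :=
  String.mk (word.toList.foldl
    (fun masked letter => if letter = ' ' then masked ++ [' '] else masked ++ ['-']) [])

-- ===== PORT B =====
-- return ' '.join('-' * len(token) for token in word.split(' '))
def maskedWord_alt (word : String) : String :=
  String.mk (PySem.Chars.join [' ']
    ((PySem.Chars.splitOn word.toList [' ']).map
      (fun token => List.replicate (PySem.Chars.len token).toNat '-')))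

-- ===== PRECONDITION & SPEC =====
def Spec_maskedWord (word : String) (out : String) : Prop := out = maskedWord_alt word
instance (word : String) (out : String) : Decidable (Spec_maskedWord word out) := by unfold Spec_maskedWord; infer_instance

-- ===== CLAIM (what is proved, stated in full; the proofs are below) =====
def Claim_equal_maskedWord : Prop := ∀ (word : String), Dom_maskedWord word → Spec_maskedWord word (maskedWord word)

-- ===== LEMMAS AND PROOFS =====

-- A reference recursion for splitting on a single space (always returns a nonempty list).
def spaceSplit : List Char → List (List Char)
  | [] => [[]]
  | c :: rest =>
    if c = ' ' then [] :: spaceSplit rest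
    else match spaceSplit rest with
         | [] => [[c]]          -- unreachable: spaceSplit is never []
         | h :: t => (c :: h) :: t

theorem spaceSplit_ne_nil (l : List Char) : spaceSplit l ≠ [] := by
  cases l with
  | nil => simp [spaceSplit]
  | cons c rest =>
    simp only [spaceSplit]
    split
    · simp
    · cases h : spaceSplit rest <;> simp

-- prepend a prefix onto the first piece
def consHead (p : List Char) : List (List Char) → List (List Char)
  | [] => [p]
  | h :: t => (p ++ h) :: t

theorem go_spec (fuel : Nat) (l cur : List Char) (acc : List (List Char))
    (h : l.length < fuel) :
    PySem.Chars.splitOn.go [' '] fuel l cur acc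
      = acc.reverse ++ consHead cur.reverse (spaceSplit l) := by
  induction fuel generalizing l cur acc with
  | zero => omega
  | succ f ih =>
    cases l with
    | nil => simp [PySem.Chars.splitOn.go, spaceSplit, consHead]
    | cons c rest =>
      by_cases hc : c = ' '
      · subst hc
        rw [show PySem.Chars.splitOn.go [' '] (f+1) (' ' :: rest) cur acc
              = PySem.Chars.splitOn.go [' '] f rest [] (cur.reverse :: acc) by
            simp [PySem.Chars.splitOn.go, List.isPrefixOf]]
        rw [ih rest [] (cur.reverse :: acc) (by simpa using Nat.lt_of_succ_lt_succ h)]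
        cases hs : spaceSplit rest with
        | nil => exact absurd hs (spaceSplit_ne_nil rest)
        | cons h0 t0 => simp [spaceSplit, hs, consHead]
      · have hpre : ([' ']).isPrefixOf (c :: rest) = false := by
          simp [List.isPrefixOf]; exact fun h => absurd h.symm hc
        rw [show PySem.Chars.splitOn.go [' '] (f+1) (c :: rest) cur acc
              = PySem.Chars.splitOn.go [' '] f rest (c :: cur) acc by
            simp [PySem.Chars.splitOn.go, hpre]]
        rw [ih rest (c :: cur) acc (by simpa using Nat.lt_of_succ_lt_succ h)]
        cases hs : spaceSplit rest with
        | nil => exact absurd hs (spaceSplit_ne_nil rest)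
        | cons h0 t0 => simp [spaceSplit, hs, hc, consHead]

theorem splitOn_eq_spaceSplit (l : List Char) :
    PySem.Chars.splitOn l [' '] = spaceSplit l := by
  have := go_spec (l.length + 1) l [] [] (by omega)
  rw [PySem.Chars.splitOn, this]
  cases hs : spaceSplit l with
  | nil => exact absurd hs (spaceSplit_ne_nil l)
  | cons h t => simp [consHead]

theorem join_cons_replicate (n : Nat) (ts : List (List Char)) :
    PySem.Chars.join [' '] (List.replicate (n + 1) '-' :: ts)
      = '-' :: PySem.Chars.join [' '] (List.replicate n '-' :: ts) := by
  cases ts <;> simp [PySem.Chars.join, List.intercalate, List.replicate]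

theorem join_mask (l : List Char) :
    PySem.Chars.join [' '] ((spaceSplit l).map (fun t => List.replicate t.length '-'))
      = l.map (fun c => if c = ' ' then ' ' else '-') := by
  induction l with
  | nil => simp [spaceSplit, PySem.Chars.join, List.intercalate]
  | cons c rest ih =>
    by_cases hc : c = ' '
    · subst hc
      cases hs : spaceSplit rest with
      | nil => exact absurd hs (spaceSplit_ne_nil rest)
      | cons h t =>
        rw [hs] at ih
        have hsp : spaceSplit (' ' :: rest) = [] :: h :: t := by simp [spaceSplit, hs]
        rw [hsp]
        simp only [List.map_cons, List.length_nil, List.replicate]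
        simpa [PySem.Chars.join, List.intercalate] using ih
    · cases hs : spaceSplit rest with
      | nil => exact absurd hs (spaceSplit_ne_nil rest)
      | cons h t =>
        rw [hs] at ih
        have hsp : spaceSplit (c :: rest) = (c :: h) :: t := by simp [spaceSplit, hc, hs]
        rw [hsp]
        simp only [List.map_cons] at ih
        simp only [List.map_cons, List.length_cons]
        rw [join_cons_replicate, ih]
        simp [hc]

theorem foldl_mask (l acc : List Char) :
    l.foldl (fun masked letter => if letter = ' ' then masked ++ [' '] else masked ++ ['-']) acc
      = acc ++ l.map (fun c => if c = ' ' then ' ' else '-') := by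
  induction l generalizing acc with
  | nil => simp
  | cons c rest ih =>
    by_cases hc : c = ' ' <;> simp [List.foldl, hc, ih]

-- ===== VERDICT (by name: the statement is the Claim_ definition above) =====
theorem maskedWord_spec : Claim_equal_maskedWord := by
  intro word _
  show maskedWord word = maskedWord_alt word
  unfold maskedWord maskedWord_alt
  rw [foldl_mask, splitOn_eq_spaceSplit]
  simp only [PySem.Chars.len_eq, Int.toNat_natCast]
  rw [join_mask, List.nil_append]
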